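-- pv_equiv track=rewrite | github.com/TejasKarkera10/lunascope | src/lunascope/components/signals.py | _navigator_stage_mode
-- ===== SOURCE A (Python) =====
-- def _navigator_stage_mode(stage_values):
--     vals = set(stage_values)
--     has_detailed = any(s in vals for s in ('N1', 'N2', 'N3', 'R'))
--     has_sw = any(s in vals for s in ('SP', 'WP'))
--     if has_detailed:
--         return 'detailed'
--     if has_sw:
--         return 'sw'
--     return 'other'
-- ===== SOURCE B (Python) =====
-- def _navigator_stage_mode(stage_values):
--     has_sw = False
--     for v in stage_values:
--         if v in {'N1', 'N2', 'N3', 'R'}: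
--             return 'detailed'
--         if v in {'SP', 'WP'}:
--             has_sw = True
--     return 'sw' if has_sw else 'other'
-- ===== Notes on version B (the rewrite author's own statement) =====
-- stated objective: alternative
-- what changed: B makes one pass over stage_values with an early return and a has_sw flag, instead of materialising a set of all values and probing it for six fixed labels.
import Mathlib
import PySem

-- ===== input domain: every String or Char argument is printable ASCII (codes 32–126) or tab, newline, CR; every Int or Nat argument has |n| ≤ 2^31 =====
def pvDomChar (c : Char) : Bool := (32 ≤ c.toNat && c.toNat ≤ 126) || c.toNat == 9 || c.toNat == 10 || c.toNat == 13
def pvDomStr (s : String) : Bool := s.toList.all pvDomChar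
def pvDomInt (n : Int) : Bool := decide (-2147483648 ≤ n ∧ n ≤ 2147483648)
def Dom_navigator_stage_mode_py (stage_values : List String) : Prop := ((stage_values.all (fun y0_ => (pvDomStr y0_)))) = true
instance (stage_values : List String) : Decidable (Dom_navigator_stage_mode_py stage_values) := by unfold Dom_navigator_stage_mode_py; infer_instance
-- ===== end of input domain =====

-- B replaces A's set-of-values plus fixed-label probing with a single early-return pass carrying a has_sw flag (alternative decomposition).


-- ===== PORT A =====
-- vals = set(stage_values); has_detailed = any(s in vals …); has_sw = any(s in vals …)
def navigator_stage_mode_py (stage_values : List String) : String :=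
  let vals : PySem.Set String := PySem.Set.ofList stage_values
  let has_detailed : Bool := ["N1", "N2", "N3", "R"].any (fun s => PySem.Set.contains vals s)
  let has_sw : Bool := ["SP", "WP"].any (fun s => PySem.Set.contains vals s)
  if has_detailed then "detailed"
  else if has_sw then "sw"
  else "other"

-- ===== PORT B =====
-- single pass over stage_values: early return on a detailed label, has_sw flag otherwise
def navigator_stage_mode_py_altLoop : List String → Bool → String
  | [], has_sw => if has_sw then "sw" else "other"
  | v :: rest, has_sw =>
    if v = "N1" ∨ v = "N2" ∨ v = "N3" ∨ v = "R" then "detailed"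
    else navigator_stage_mode_py_altLoop rest (has_sw || (v = "SP" || v = "WP"))

def navigator_stage_mode_py_alt (stage_values : List String) : String :=
  navigator_stage_mode_py_altLoop stage_values false

-- ===== PRECONDITION & SPEC =====
def Spec_navigator_stage_mode_py (stage_values : List String) (out : String) : Prop := out = navigator_stage_mode_py_alt stage_values
instance (stage_values : List String) (out : String) : Decidable (Spec_navigator_stage_mode_py stage_values out) := by unfold Spec_navigator_stage_mode_py; infer_instance

-- ===== CLAIM (what is proved, stated in full; the proofs are below) =====
def Claim_equal_navigator_stage_mode_py : Prop := ∀ (stage_values : List String), Dom_navigator_stage_mode_py stage_values → Spec_navigator_stage_mode_py stage_values (navigator_stage_mode_py stage_values)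

-- ===== LEMMAS AND PROOFS =====

def pvDet (v : String) : Bool := v = "N1" || v = "N2" || v = "N3" || v = "R"
def pvSw (v : String) : Bool := v = "SP" || v = "WP"

-- B's loop, characterised
theorem altLoop_eq (xs : List String) (hs : Bool) :
    navigator_stage_mode_py_altLoop xs hs =
      if xs.any pvDet then "detailed"
      else if hs || xs.any pvSw then "sw" else "other" := by
  induction xs generalizing hs with
  | nil => simp [navigator_stage_mode_py_altLoop]
  | cons v rest ih =>
    simp only [navigator_stage_mode_py_altLoop, List.any_cons]
    by_cases hd : pvDet v
    · have : v = "N1" ∨ v = "N2" ∨ v = "N3" ∨ v = "R" := by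
        simp [pvDet] at hd; tauto
      simp [this, hd]
    · have hne : ¬ (v = "N1" ∨ v = "N2" ∨ v = "N3" ∨ v = "R") := by
        simp [pvDet] at hd; tauto
      simp only [if_neg hne, ih]
      simp [hd, pvSw, Bool.or_assoc, Bool.or_comm, Bool.or_left_comm]

theorem mem_ofList_iff (xs : List String) (s : String) :
    PySem.Set.contains (PySem.Set.ofList xs) s = xs.contains s := by
  simp [PySem.Set.contains, PySem.Set.mem_ofList, List.contains_iff_mem]

-- ===== VERDICT (by name: the statement is the Claim_ definition above) =====
theorem navigator_stage_mode_py_spec : Claim_equal_navigator_stage_mode_py := by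
  unfold Claim_equal_navigator_stage_mode_py
  intro xs _
  unfold Spec_navigator_stage_mode_py navigator_stage_mode_py navigator_stage_mode_py_alt
  rw [altLoop_eq]
  simp only [mem_ofList_iff, List.any_cons, List.any_nil, Bool.or_false, Bool.false_or]
  have hdet : (xs.contains "N1" || (xs.contains "N2" || (xs.contains "N3" || xs.contains "R")))
      = xs.any pvDet := by
    rw [Bool.eq_iff_iff]
    simp only [pvDet, List.any_eq_true, Bool.or_eq_true, List.contains_iff_mem,
      decide_eq_true_eq]
    constructor
    · rintro (h|h|h|h) <;> exact ⟨_, h, by simp⟩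
    · rintro ⟨a, ha, h⟩
      rcases h with ((h|h)|h)|h <;> subst h <;> tauto
  have hsw : (xs.contains "SP" || xs.contains "WP") = xs.any pvSw := by
    rw [Bool.eq_iff_iff]
    simp only [pvSw, List.any_eq_true, Bool.or_eq_true, List.contains_iff_mem,
      decide_eq_true_eq]
    constructor
    · rintro (h|h) <;> exact ⟨_, h, by simp⟩
    · rintro ⟨a, ha, h⟩
      rcases h with h|h <;> subst h <;> tauto
  rw [hdet, hsw]
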